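-- pv_equiv track=rewrite | github.com/bmlsj/algorithm | 프로그래머스/2/138476. 귤 고르기/귤 고르기.py | solution
-- ===== SOURCE A (Python) =====
-- def solution(k, tangerine):
--     answer = 0
--     tangerine.sort()
--     map = {}
--
--     for num in tangerine:
--         if num not in map:
--             map[num] = 0
--         map[num] += 1
--
--     map = dict(sorted(map.items(), key = lambda x:x[1], reverse=True))
--     tmp = 0
--     for key, num in map.items():
--         if map[key] > 0 and tmp < k:
--             while map[key] > 0:
--                 tmp += 1
--                 map[key] -= 1
--
--     for key, num in map.items():
--         if num == 0:
--             answer+=1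
--     return answer
-- ===== SOURCE B (Python) =====
-- def solution(k, tangerine):
--     tangerine.sort()  # keep A's in-place sort of the argument
--     counts = {}
--     for x in tangerine:
--         counts[x] = counts.get(x, 0) + 1
--     # counting-sort buckets: bucket[c] = number of tangerine sizes occurring exactly c times
--     bucket = [0] * (len(tangerine) + 1)
--     for c in counts.values():
--         bucket[c] += 1
--     answer = 0
--     need = k
--     for c in range(len(tangerine), 0, -1):
--         t = bucket[c]
--         if t == 0:
--             continue
--         if need <= 0:
--             break
--         if need <= c * t:
--             answer += -(-need // c)
--             need = 0
--         else:
--             need -= c * t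
--             answer += t
--     return answer
-- ===== Notes on version B (the rewrite author's own statement) =====
-- stated objective: faster
-- what changed: B replaces A's sort-the-frequency-dict greedy (drain-to-zero inner while loop over a mutable dict plus a zero-counting pass) by a counting-sort scheme: a bucket array indexed by frequency (bucket[c] = number of types occurring c times) scanned once from the largest frequency down, taking whole buckets in bulk with a ceiling division instead of one unit step per tangerine; B keeps tangerine.sort() so the in-place mutation of the argument is identical.
import Mathlib
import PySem

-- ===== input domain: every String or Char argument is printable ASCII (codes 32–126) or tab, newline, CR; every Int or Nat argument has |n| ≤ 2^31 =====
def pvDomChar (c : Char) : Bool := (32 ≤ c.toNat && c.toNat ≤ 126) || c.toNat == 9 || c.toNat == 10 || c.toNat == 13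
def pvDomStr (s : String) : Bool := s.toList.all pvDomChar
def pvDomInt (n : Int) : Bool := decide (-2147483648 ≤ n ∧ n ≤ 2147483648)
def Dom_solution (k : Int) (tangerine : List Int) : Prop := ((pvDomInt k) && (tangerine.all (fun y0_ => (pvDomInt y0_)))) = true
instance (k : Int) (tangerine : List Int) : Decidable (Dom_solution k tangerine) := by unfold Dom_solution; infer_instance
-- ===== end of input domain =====

-- B replaces A's sort-the-frequency-dict greedy (drain-to-zero inner while loop plus a
-- zero-counting pass) by a counting-sort bucket array indexed by frequency, scanned once from
-- the largest frequency down and taken in bulk with a ceiling division (objective: faster by a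
-- constant factor: no per-unit while loop and no sort of the counts).
-- Both Pythons sort `tangerine` in place; the theorems below are about the return value.

-- ===== PORT A =====
-- for num in tangerine: if num not in map: map[num] = 0;  map[num] += 1
-- (map[num] is read via getD 0: the key is always present at that read, so the value agrees)
def buildStepA (m : PySem.Dict Int Int) (num : Int) : PySem.Dict Int Int :=
  let m := if m.contains num then m else m.insert num 0
  m.insert num (m.getD num 0 + 1)

-- while map[key] > 0: tmp += 1; map[key] -= 1   (fuel = initial count; the guard is re-checked)
def drainA (key : Int) : Nat → PySem.Dict Int Int → Int → PySem.Dict Int Int × Int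
  | 0, d, tmp => (d, tmp)
  | fuel + 1, d, tmp =>
    if 0 < d.getD key 0 then
      drainA key fuel (PySem.Dict.modify d key 0 (fun v => v - 1)) (tmp + 1)
    else (d, tmp)

-- for key, num in map.items(): if map[key] > 0 and tmp < k: while …
def loopA (k : Int) : List (Int × Int) → PySem.Dict Int Int → Int → PySem.Dict Int Int × Int
  | [], d, tmp => (d, tmp)
  | p :: rest, d, tmp =>
    if 0 < d.getD p.1 0 ∧ tmp < k then
      let s := drainA p.1 (d.getD p.1 0).toNat d tmp
      loopA k rest s.1 s.2
    else loopA k rest d tmp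

def solution (k : Int) (tangerine : List Int) : Int :=
  let answer : Int := 0
  let t := PySem.List.sorted tangerine (fun x => x)
  let m := t.foldl buildStepA PySem.Dict.empty
  let m2 := PySem.Dict.ofList (PySem.List.sorted m.items (fun p => p.2) true)
  let s := loopA k m2.items m2 0
  s.1.items.foldl (fun ans p => if p.2 = 0 then ans + 1 else ans) answer

-- ===== PORT B =====
-- counts[x] = counts.get(x, 0) + 1
def countStepB (d : PySem.Dict Int Int) (x : Int) : PySem.Dict Int Int :=
  d.insert x (d.getD x 0 + 1)

-- bucket[c] += 1  (c = counts[x] satisfies 1 ≤ c ≤ len(tangerine) < len(bucket), so the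
-- total pyGetD/pySetD forms are exact here)
def bucketStepB (b : List Int) (c : Int) : List Int :=
  PySem.List.pySetD b c (PySem.List.pyGetD b c 0 + 1)

-- for c in range(len(tangerine), 0, -1): t = bucket[c]; if t == 0: continue;
--   if need <= 0: break; if need <= c*t: answer += -(-need//c); need = 0; else: …
def takeB : List Int → List Int → Int → Int → Int
  | [], _, _, answer => answer
  | c :: cs, bucket, need, answer =>
    let t := PySem.List.pyGetD bucket c 0
    if t = 0 then takeB cs bucket need answer
    else if need ≤ 0 then answer
    else if need ≤ c * t then takeB cs bucket 0 (answer + (-(PySem.Int.floordiv (-need) c)))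
    else takeB cs bucket (need - c * t) (answer + t)

def solution_alt (k : Int) (tangerine : List Int) : Int :=
  let t := PySem.List.sorted tangerine (fun x => x)
  let counts := t.foldl countStepB PySem.Dict.empty
  let bucket := counts.values.foldl bucketStepB (List.replicate (t.length + 1) 0)
  takeB (PySem.List.pyRange (t.length : Int) 0 (-1)) bucket k 0

-- ===== PRECONDITION & SPEC =====
def Spec_solution (k : Int) (tangerine : List Int) (out : Int) : Prop := out = solution_alt k tangerine
instance (k : Int) (tangerine : List Int) (out : Int) : Decidable (Spec_solution k tangerine out) := by unfold Spec_solution; infer_instance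

-- ===== CLAIM (what is proved, stated in full; the proofs are below) =====
def Claim_equal_solution : Prop := ∀ (k : Int) (tangerine : List Int), Dom_solution k tangerine → Spec_solution k tangerine (solution k tangerine)

-- ===== LEMMAS AND PROOFS =====

-- the reference accumulation: walk the multiset of counts in descending order, taking whole
-- groups while the running total is below k; both ports are reduced to this
def accumB (k : Int) : List Int → Int → Int → Int
  | [], _total, answer => answer
  | c :: cs, total, answer =>
    if k ≤ total then answer else accumB k cs (total + c) (answer + 1)

theorem dict_eq_of_items_eq (d e : PySem.Dict Int Int) (h : d.items = e.items) : d = e := by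
  cases d; cases e; simpa using h

theorem not_contains_forall (d : PySem.Dict Int Int) (key : Int)
    (h : d.contains key = false) : ∀ p ∈ d.items, p.1 ≠ key := by
  intro p hp hk
  have := List.any_eq_false.mp h p hp
  simp [hk] at this

theorem map_replace_id (l : List (Int × Int)) (key v : Int)
    (h : ∀ p ∈ l, p.1 ≠ key) :
    List.map (fun p => if (p.1 == key) = true then (key, v) else p) l = l := by
  conv_rhs => rw [← List.map_id l]
  apply List.map_congr_left
  intro p hp; simp [h p hp]

theorem insert_insert_same (d : PySem.Dict Int Int) (key a b : Int) :
    (d.insert key a).insert key b = d.insert key b := by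
  apply dict_eq_of_items_eq
  by_cases hc : d.contains key = true
  · rw [PySem.Dict.items_insert_of_contains _ b (by simp [PySem.Dict.contains_insert_self]),
        PySem.Dict.items_insert_of_contains _ a hc,
        PySem.Dict.items_insert_of_contains _ b hc, List.map_map]
    apply List.map_congr_left; intro q hq
    by_cases hqk : q.1 = key <;> simp [hqk]
  · rw [PySem.Dict.items_insert_of_contains _ b (by simp [PySem.Dict.contains_insert_self]),
        PySem.Dict.items_insert_of_not_contains _ a (by simpa using hc),
        PySem.Dict.items_insert_of_not_contains _ b (by simpa using hc), List.map_append,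
        map_replace_id _ _ _ (not_contains_forall d key (by simpa using hc))]
    simp

-- A's two-step insertion is B's one-step counting insertion
theorem buildStepA_eq_countStepB (d : PySem.Dict Int Int) (x : Int) :
    buildStepA d x = countStepB d x := by
  by_cases hc : d.contains x = true
  · simp [buildStepA, countStepB, hc]
  · have hc' : d.contains x = false := by simpa using hc
    simp only [buildStepA, countStepB, hc', Bool.false_eq_true, if_false]
    rw [PySem.Dict.getD_insert_self, insert_insert_same,
        PySem.Dict.getD_of_not_contains d 0 hc']

theorem mem_items_unique (d : PySem.Dict Int Int) (p q : Int × Int)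
    (hp : p ∈ d.items) (hq : q ∈ d.items) (hnd : d.keys.Nodup) (h : p.1 = q.1) : p = q :=
  List.inj_on_of_nodup_map (by simpa [PySem.Dict.keys] using hnd) hp hq h

theorem insert_getD_self_eq (d : PySem.Dict Int Int) (key : Int)
    (hnd : d.keys.Nodup) (hc : d.contains key = true) :
    d.insert key (d.getD key 0) = d := by
  obtain ⟨p, hp, hpk⟩ := List.any_eq_true.mp hc
  have hpk' : p.1 = key := by simpa using hpk
  have hget : d.get? key = some p.2 := by
    apply PySem.Dict.get?_of_mem_items _ _ hnd
    rwa [← hpk']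
  have hgetD : d.getD key 0 = p.2 := by simp [PySem.Dict.getD, hget]
  apply dict_eq_of_items_eq
  rw [PySem.Dict.items_insert_of_contains _ _ hc, hgetD]
  conv_rhs => rw [← List.map_id d.items]
  apply List.map_congr_left
  intro q hq
  by_cases hqk : q.1 = key
  · have : q = p := mem_items_unique d q p hq hp hnd (by rw [hqk, hpk'])
    simp [this, hqk, ← hpk']
  · simp [hqk]

theorem drainA_eq (key : Int) : ∀ (c : Nat) (d : PySem.Dict Int Int) (tmp : Int),
    d.getD key 0 = (c : Int) → d.contains key = true → d.keys.Nodup →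
    drainA key c d tmp = (d.insert key 0, tmp + c) := by
  intro c
  induction c with
  | zero =>
    intro d tmp hget hc hnd
    have : d.insert key 0 = d := by
      have := insert_getD_self_eq d key hnd hc
      rwa [hget] at this
    simp [drainA, hget, this]
  | succ n ih =>
    intro d tmp hget hc hnd
    have hpos : 0 < d.getD key 0 := by rw [hget]; positivity
    rw [drainA, if_pos hpos, PySem.Dict.modify, hget]
    have h1 : ((n+1 : Nat):Int) - 1 = (n : Int) := by push_cast; ring
    rw [h1]
    rw [ih (d.insert key n) (tmp+1) (by simp [PySem.Dict.getD_insert_self])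
        (PySem.Dict.contains_insert_self d key _)
        (by rw [PySem.Dict.keys_insert_of_contains d _ hc]; exact hnd)]
    rw [insert_insert_same]
    have : tmp + 1 + (n:Int) = tmp + ((n+1 : Nat):Int) := by push_cast; ring
    rw [this]

theorem countP_replace : ∀ (l : List (Int × Int)) (key c : Int),
    (l.map Prod.fst).Nodup → (key, c) ∈ l → c ≠ 0 →
    (l.map (fun p => if p.1 == key then (key, (0:Int)) else p)).countP (fun p => p.2 == 0)
      = l.countP (fun p => p.2 == 0) + 1 := by
  intro l
  induction l with
  | nil => intro key c _ h; simp at h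
  | cons h t ih =>
    intro key c hnd hmem hc
    rw [List.map_cons] at hnd
    have hnotin := (List.nodup_cons.mp hnd).1
    rcases List.mem_cons.mp hmem with heq | htail
    · subst heq
      have hnotin' : key ∉ t.map Prod.fst := by simpa using hnotin
      have htid : List.map (fun p => if (p.1 == key) = true then (key, (0:Int)) else p) t = t := by
        apply map_replace_id
        intro p hp hpk
        exact hnotin' (hpk ▸ List.mem_map_of_mem (f := Prod.fst) hp)
      rw [List.map_cons, htid, List.countP_cons, List.countP_cons]
      simp [hc]
    · have hkey : key ∈ t.map Prod.fst := by
        simpa using List.mem_map_of_mem (f := Prod.fst) htail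
      have hhk : h.1 ≠ key := fun hk => hnotin (hk ▸ hkey)
      have hhkb : (h.1 == key) = false := by simpa using hhk
      simp only [List.map_cons, List.countP_cons, hhkb]
      rw [ih key c (List.nodup_cons.mp hnd).2 htail hc]
      by_cases hz : h.2 = 0 <;> simp [hz] <;> omega

theorem zc_foldl : ∀ (l : List (Int × Int)) (a : Int),
    l.foldl (fun ans p => if p.2 = 0 then ans + 1 else ans) a
      = a + (l.countP (fun p => p.2 == 0) : Int) := by
  intro l
  induction l with
  | nil => simp
  | cons h t ih =>
    intro a
    by_cases hz : h.2 = 0 <;> simp [List.countP_cons, hz, ih] <;> push_cast <;> ring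

theorem loopA_frozen (k : Int) : ∀ (rest : List (Int × Int)) (d : PySem.Dict Int Int) (tmp : Int),
    k ≤ tmp → loopA k rest d tmp = (d, tmp) := by
  intro rest
  induction rest with
  | nil => intro d tmp _; rfl
  | cons p t ih =>
    intro d tmp h
    rw [loopA, if_neg (by omega)]
    exact ih d tmp h

theorem accumB_shift (k : Int) : ∀ (cs : List Int) (t a : Int),
    accumB k cs t a = a + accumB k cs t 0 := by
  intro cs
  induction cs with
  | nil => intro t a; simp [accumB]
  | cons c cs ih =>
    intro t a
    by_cases h : k ≤ t
    · simp [accumB, h]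
    · rw [accumB, if_neg h, accumB, if_neg h, ih (t+c) (a+1), ih (t+c) (0+1)]
      ring

theorem loopA_main (k : Int) : ∀ (rest : List (Int × Int)) (d : PySem.Dict Int Int) (tmp : Int),
    d.keys.Nodup → (rest.map Prod.fst).Nodup →
    (∀ p ∈ rest, d.getD p.1 0 = p.2 ∧ 0 < p.2 ∧ d.contains p.1 = true) →
    ((loopA k rest d tmp).1.items.countP (fun p => p.2 == 0) : Int)
      = (d.items.countP (fun p => p.2 == 0) : Int) + accumB k (rest.map Prod.snd) tmp 0 := by
  intro rest
  induction rest with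
  | nil => intro d tmp _ _ _; simp [loopA, accumB]
  | cons p t ih =>
    intro d tmp hnd hrnd hinv
    obtain ⟨hget, hpos, hcon⟩ := hinv p (List.mem_cons_self)
    rw [List.map_cons] at hrnd
    have hnotin := (List.nodup_cons.mp hrnd).1
    have hfst : ∀ q ∈ t, q.1 ≠ p.1 := by
      intro q hq hqk
      exact hnotin (by simpa [← hqk] using List.mem_map_of_mem (f := Prod.fst) hq)
    by_cases hk : tmp < k
    · rw [loopA, if_pos ⟨by omega, hk⟩]
      have htn : ((p.2.toNat : Nat) : Int) = p.2 := Int.toNat_of_nonneg (by omega)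
      have hd := drainA_eq p.1 p.2.toNat d tmp (by rw [hget, htn]) hcon hnd
      rw [htn] at hd
      simp only [hget, hd]
      have hnd2 : (d.insert p.1 0).keys.Nodup := by
        rw [PySem.Dict.keys_insert_of_contains d _ hcon]; exact hnd
      have hinv2 : ∀ q ∈ t, (d.insert p.1 0).getD q.1 0 = q.2 ∧ 0 < q.2 ∧ (d.insert p.1 0).contains q.1 = true := by
        intro q hq
        obtain ⟨hg, hp2, hc2⟩ := hinv q (List.mem_cons_of_mem _ hq)
        refine ⟨?_, hp2, ?_⟩
        · rw [PySem.Dict.getD_insert, if_neg (hfst q hq)]; exact hg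
        · rw [PySem.Dict.contains_insert]; simp [hc2]
      rw [ih (d.insert p.1 0) (tmp + p.2) hnd2 (List.nodup_cons.mp hrnd).2 hinv2]
      have hz : ((d.insert p.1 0).items.countP (fun q => q.2 == 0) : Int)
          = (d.items.countP (fun q => q.2 == 0) : Int) + 1 := by
        rw [PySem.Dict.items_insert_of_contains _ _ hcon]
        have hmem : (p.1, p.2) ∈ d.items := by
          obtain ⟨q, hq, hqk⟩ := List.any_eq_true.mp hcon
          have hq1 : q.1 = p.1 := by simpa using hqk
          have hg : d.get? p.1 = some q.2 := PySem.Dict.get?_of_mem_items d (by rwa [← hq1]) hnd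
          have hgd : d.getD p.1 0 = q.2 := by simp [PySem.Dict.getD, hg]
          rw [hget] at hgd
          rw [← hq1, hgd]; exact hq
        have := countP_replace d.items p.1 p.2 (by simpa [PySem.Dict.keys] using hnd) hmem (by omega)
        rw [this]; push_cast; ring
      rw [hz]
      simp only [List.map_cons]
      rw [accumB, if_neg (by omega), accumB_shift k (List.map Prod.snd t) (tmp + p.2) (0+1)]
      ring
    · rw [loopA, if_neg (by omega), loopA_frozen k t d tmp (by omega)]
      simp only [List.map_cons]
      rw [accumB, if_pos (by omega)]
      simp

theorem items_update : ∀ (ps : List (Int × Int)) (d : PySem.Dict Int Int),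
    ((d.keys ++ ps.map Prod.fst).Nodup) → (d.update ps).items = d.items ++ ps := by
  intro ps
  induction ps with
  | nil => intro d _; simp [PySem.Dict.update]
  | cons a ps ih =>
    intro d hnd
    have hnotin : a.1 ∉ d.keys := by
      have := List.disjoint_of_nodup_append hnd
      intro h
      exact this h (by simp)
    have hcon : d.contains a.1 = false := by
      rcases Bool.eq_false_or_eq_true (d.contains a.1) with h | h
      · exact absurd ((PySem.Dict.contains_iff_mem_keys d a.1).mp h) hnotin
      · exact h
    have hstep : PySem.Dict.update d (a :: ps) = PySem.Dict.update (d.insert a.1 a.2) ps := by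
      simp [PySem.Dict.update]
    rw [hstep, ih (d.insert a.1 a.2) ?hnd2]
    · rw [PySem.Dict.items_insert_of_not_contains d a.2 hcon]
      simp
    · rw [PySem.Dict.keys_insert_of_not_contains d a.2 hcon]
      simpa [List.append_assoc] using hnd

theorem items_ofList (ps : List (Int × Int)) (h : (ps.map Prod.fst).Nodup) :
    (PySem.Dict.ofList ps).items = ps := by
  rw [PySem.Dict.ofList, items_update ps PySem.Dict.empty (by simpa [PySem.Dict.keys, PySem.Dict.empty] using h)]
  simp [PySem.Dict.empty]

theorem sorted_rev_snd_comm (l : List (Int × Int)) :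
    (PySem.List.sorted l (fun p => p.2) true).map Prod.snd
      = PySem.List.sorted (l.map Prod.snd) (fun c => c) true := by
  apply List.Perm.eq_of_pairwise (le := fun a b : Int => b ≤ a)
  · intro a b _ _ h1 h2; omega
  · exact List.pairwise_map.mpr (PySem.List.sorted_pairwise_rev l (fun p => p.2))
  · exact PySem.List.sorted_pairwise_rev (l.map Prod.snd) (fun c => c)
  · exact ((PySem.List.sorted_perm l (fun p => p.2) true).map Prod.snd).trans
      (PySem.List.sorted_perm (l.map Prod.snd) (fun c => c) true).symm

-- ===== B-side lemmas: bucket correctness and the bulk-take accumulation =====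

theorem bucket_count : ∀ (vs b : List Int) (c : Int),
    1 ≤ c → c.toNat < b.length → (∀ v ∈ vs, 1 ≤ v ∧ v.toNat < b.length) →
    PySem.List.pyGetD (vs.foldl bucketStepB b) c 0
      = PySem.List.pyGetD b c 0 + (vs.count c : Int) := by
  intro vs
  induction vs with
  | nil => intro b c _ _ _; simp
  | cons v vs ih =>
    intro b c hc hcb hvs
    obtain ⟨hv1, hvb⟩ := hvs v (by simp)
    rw [List.foldl_cons]
    have hb' : (bucketStepB b v).length = b.length := by
      simp [bucketStepB, PySem.List.length_pySetD]
    rw [ih (bucketStepB b v) c hc (by rwa [hb'])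
        (fun w hw => by rw [hb']; exact hvs w (List.mem_cons_of_mem _ hw))]
    have hset : bucketStepB b v = b.set v.toNat (PySem.List.pyGetD b v 0 + 1) := by
      unfold bucketStepB
      exact PySem.List.pySetD_of_nonneg b _ (by omega)
    have hgc : PySem.List.pyGetD (bucketStepB b v) c 0
        = if c = v then PySem.List.pyGetD b v 0 + 1 else PySem.List.pyGetD b c 0 := by
      rw [hset]
      rw [PySem.List.pyGetD_eq_getElem _ _ (by omega) (by rw [List.length_set]; push_cast; omega)]
      rw [List.getElem_set]
      by_cases hcv : c = v
      · rw [if_pos (by omega), if_pos hcv]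
      · rw [if_neg (by omega), if_neg hcv]
        exact (PySem.List.pyGetD_eq_getElem b 0 (by omega) (by push_cast; omega)).symm
    rw [hgc, List.count_cons]
    by_cases hcv : c = v
    · subst hcv
      rw [if_pos rfl, if_pos (by simp)]
      push_cast; ring
    · rw [if_neg hcv, if_neg (by simpa using Ne.symm hcv)]
      push_cast; ring

theorem count_flat : ∀ (cs : List Int) (g : Int → Nat) (v : Int), cs.Nodup →
    (cs.flatMap (fun c => List.replicate (g c) c)).count v
      = if v ∈ cs then g v else 0 := by
  intro cs
  induction cs with
  | nil => intro g v _; simp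
  | cons c cs ih =>
    intro g v hnd
    obtain ⟨hnotin, hnd'⟩ := List.nodup_cons.mp hnd
    rw [List.flatMap_cons, List.count_append, List.count_replicate, ih g v hnd']
    by_cases hvc : v = c
    · subst hvc
      rw [if_pos (by simp), if_neg hnotin, if_pos (List.mem_cons_self)]
      omega
    · rw [if_neg (by simpa using Ne.symm hvc)]
      by_cases hvm : v ∈ cs
      · rw [if_pos hvm, if_pos (List.mem_cons_of_mem _ hvm)]
        omega
      · rw [if_neg hvm, if_neg (by simp [hvc, hvm])]

theorem flat_pairwise : ∀ (cs : List Int) (g : Int → Nat),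
    cs.Pairwise (fun a b => b < a) →
    (cs.flatMap (fun c => List.replicate (g c) c)).Pairwise (fun a b : Int => b ≤ a) := by
  intro cs
  induction cs with
  | nil => intro g _; simp
  | cons c cs ih =>
    intro g hp
    rw [List.flatMap_cons]
    apply List.pairwise_append.mpr
    refine ⟨List.pairwise_replicate.mpr (by omega), ih g (List.pairwise_cons.mp hp).2, ?_⟩
    intro x hx y hy
    have hx' : x = c := List.eq_of_mem_replicate hx
    obtain ⟨c', hc', hy'⟩ := List.mem_flatMap.mp hy
    have hy'' : y = c' := List.eq_of_mem_replicate hy'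
    have := (List.pairwise_cons.mp hp).1 c' hc'
    omega

theorem accumB_frozen (k : Int) (l : List Int) (total a : Int) (h : k ≤ total) :
    accumB k l total a = a := by
  cases l with
  | nil => rfl
  | cons c cs => rw [accumB, if_pos h]

theorem takeB_nonpos : ∀ (cs bucket : List Int) (need a : Int), need ≤ 0 →
    takeB cs bucket need a = a := by
  intro cs
  induction cs with
  | nil => intro bucket need a _; rfl
  | cons c cs ih =>
    intro bucket need a h
    simp only [takeB]
    by_cases ht : PySem.List.pyGetD bucket c 0 = 0
    · rw [if_pos ht]
      exact ih bucket need a h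
    · rw [if_neg ht, if_pos h]

theorem accumB_take (k c : Int) (hc : 0 < c) : ∀ (T : Nat) (total a : Int) (rest : List Int),
    total < k → k ≤ total + c * T →
    accumB k (List.replicate T c ++ rest) total a
      = a + (-(PySem.Int.floordiv (-(k - total)) c)) := by
  intro T
  induction T with
  | zero => intro total a rest h1 h2; simp at h2; omega
  | succ T ih =>
    intro total a rest h1 h2
    rw [List.replicate_succ, List.cons_append, accumB, if_neg (by omega)]
    by_cases hk : k ≤ total + c
    · rw [accumB_frozen k _ _ _ hk]
      have hceil : -(PySem.Int.floordiv (-(k - total)) c) = 1 := by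
        rw [PySem.Int.neg_floordiv_neg_eq_iff_of_pos hc]
        constructor <;> nlinarith
      omega
    · have hT : k ≤ total + c + c * T := by push_cast at h2 ⊢; nlinarith [h2]
      rw [ih (total + c) (a + 1) rest (by omega) (by push_cast at h2 ⊢; nlinarith)]
      set q := -(PySem.Int.floordiv (-(k - (total + c))) c) with hq
      have hqb := (PySem.Int.neg_floordiv_neg_eq_iff_of_pos hc (a := k - (total + c))).mp hq.symm
      have hceil : -(PySem.Int.floordiv (-(k - total)) c) = q + 1 := by
        rw [PySem.Int.neg_floordiv_neg_eq_iff_of_pos hc]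
        constructor <;> nlinarith [hqb.1, hqb.2]
      omega

theorem accumB_skip (k c : Int) (hc : 0 < c) : ∀ (T : Nat) (total a : Int) (rest : List Int),
    total + c * T < k →
    accumB k (List.replicate T c ++ rest) total a
      = accumB k rest (total + c * T) (a + T) := by
  intro T
  induction T with
  | zero => intro total a rest h; simp
  | succ T ih =>
    intro total a rest h
    have hpos : (0:Int) < c * (T + 1) := by positivity
    rw [List.replicate_succ, List.cons_append, accumB,
        if_neg (by push_cast at h hpos ⊢; nlinarith)]
    rw [ih (total + c) (a + 1) rest (by push_cast at h ⊢; nlinarith)]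
    congr 1 <;> push_cast <;> ring

theorem takeB_eq_accumB (k : Int) (bucket : List Int) :
    ∀ (cs : List Int) (total a : Int),
    (∀ c ∈ cs, 0 < c ∧ 0 ≤ PySem.List.pyGetD bucket c 0) →
    takeB cs bucket (k - total) a
      = accumB k (cs.flatMap (fun c => List.replicate (PySem.List.pyGetD bucket c 0).toNat c)) total a := by
  intro cs
  induction cs with
  | nil => intro total a _; rfl
  | cons c cs ih =>
    intro total a hcs
    obtain ⟨hc, ht0⟩ := hcs c (by simp)
    have hcs' := fun w hw => hcs w (List.mem_cons_of_mem _ hw)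
    have htT : (((PySem.List.pyGetD bucket c 0).toNat : Nat) : Int)
        = PySem.List.pyGetD bucket c 0 := Int.toNat_of_nonneg ht0
    rw [List.flatMap_cons]
    simp only [takeB]
    by_cases ht : PySem.List.pyGetD bucket c 0 = 0
    · rw [if_pos ht, ih total a hcs', ht]
      simp
    · rw [if_neg ht]
      by_cases hneed : k - total ≤ 0
      · rw [if_pos hneed, accumB_frozen k _ _ _ (by omega)]
      · rw [if_neg hneed]
        by_cases hfit : k - total ≤ c * PySem.List.pyGetD bucket c 0
        · rw [if_pos hfit, takeB_nonpos _ _ _ _ le_rfl,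
              accumB_take k c hc _ total a _ (by omega) (by rw [htT]; omega)]
        · rw [if_neg hfit,
              accumB_skip k c hc _ total a _ (by rw [htT]; omega)]
          have h2 : k - total - c * PySem.List.pyGetD bucket c 0
              = k - (total + c * (((PySem.List.pyGetD bucket c 0).toNat : Nat) : Int)) := by
            rw [htT]; ring
          rw [h2, ih _ _ hcs', htT]

theorem solution_spec : Claim_equal_solution := by
  intro k tangerine _
  unfold Spec_solution solution solution_alt
  simp only []
  set t := PySem.List.sorted tangerine (fun x => x) with ht
  have hfoldB : t.foldl countStepB PySem.Dict.empty = PySem.Dict.counter t :=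
    PySem.Dict.foldl_insert_getD_add_one_eq_counter t
  have hfoldA : t.foldl buildStepA PySem.Dict.empty = PySem.Dict.counter t := by
    have hfun : buildStepA = countStepB := funext₂ buildStepA_eq_countStepB
    rw [hfun, hfoldB]
  rw [hfoldA, hfoldB]
  set m := PySem.Dict.counter t with hm
  set n := t.length with hn
  -- ===== A side: reduce to accumB over the descending multiset of counts =====
  have hmnodup : (m.items.map Prod.fst).Nodup := by
    have := PySem.Dict.nodup_keys_counter t
    simpa [PySem.Dict.keys, hm] using this
  have hpos : ∀ p ∈ m.items, 0 < p.2 := by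
    rw [hm, PySem.Dict.items_counter]
    intro p hp
    obtain ⟨x, hx, rfl⟩ := List.mem_map.mp hp
    have hxt : x ∈ t := (PySem.Set.mem_ofList t x).mp hx
    have := List.count_pos_iff.mpr hxt
    simpa using this
  set ps := PySem.List.sorted m.items (fun p => p.2) true with hps
  have hpsnodup : (ps.map Prod.fst).Nodup := by
    have hperm : (ps.map Prod.fst).Perm (m.items.map Prod.fst) :=
      (PySem.List.sorted_perm m.items (fun p => p.2) true).map Prod.fst
    exact hperm.nodup_iff.mpr hmnodup
  have hofitems : (PySem.Dict.ofList ps).items = ps := items_ofList ps hpsnodup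
  have hofkeys : (PySem.Dict.ofList ps).keys.Nodup := by
    rw [PySem.Dict.keys, hofitems]; exact hpsnodup
  have hpspos : ∀ p ∈ ps, 0 < p.2 := by
    intro p hp
    exact hpos p ((PySem.List.sorted_perm m.items (fun q => q.2) true).mem_iff.mp hp)
  have hinv : ∀ p ∈ ps, (PySem.Dict.ofList ps).getD p.1 0 = p.2 ∧ 0 < p.2 ∧
      (PySem.Dict.ofList ps).contains p.1 = true := by
    intro p hp
    have hmem : (p.1, p.2) ∈ (PySem.Dict.ofList ps).items := by rw [hofitems]; exact hp
    have hg := PySem.Dict.get?_of_mem_items _ hmem hofkeys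
    refine ⟨by simp [PySem.Dict.getD, hg], hpspos p hp, ?_⟩
    apply List.any_eq_true.mpr
    exact ⟨(p.1, p.2), hmem, by simp⟩
  have hz0 : ((PySem.Dict.ofList ps).items.countP (fun p => p.2 == 0)) = 0 := by
    rw [hofitems]
    apply List.countP_eq_zero.mpr
    intro p hp
    have := hpspos p hp
    simp; omega
  rw [zc_foldl, hofitems, loopA_main k ps (PySem.Dict.ofList ps) 0 hofkeys hpsnodup hinv, hz0]
  simp only [Nat.cast_zero, zero_add]
  have hAside : ps.map Prod.snd = PySem.List.sorted (m.items.map Prod.snd) (fun c => c) true := by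
    rw [hps, sorted_rev_snd_comm]
  rw [hAside]
  -- ===== B side: bucket counting =====
  set vals := m.values with hv
  have hvals : vals = (PySem.Set.ofList t).map (fun x => ((t.count x : Nat) : Int)) := by
    rw [hv, hm, PySem.Dict.values_eq_map_keys _ (PySem.Dict.nodup_keys_counter t) 0,
        PySem.Dict.keys_counter]
    apply List.map_congr_left
    intro x _
    exact PySem.Dict.getD_counter t x
  have hsnd : m.items.map Prod.snd = vals := by
    rw [hvals, hm, PySem.Dict.items_counter, List.map_map]
    rfl
  rw [hsnd]
  have hvbound : ∀ v ∈ vals, 1 ≤ v ∧ v.toNat < n + 1 := by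
    intro v hvv
    rw [hvals] at hvv
    obtain ⟨x, hx, rfl⟩ := List.mem_map.mp hvv
    have hxt : x ∈ t := (PySem.Set.mem_ofList t x).mp hx
    have h1 := List.count_pos_iff.mpr hxt
    have h2 := List.count_le_length (l := t) (a := x)
    constructor
    · exact_mod_cast h1
    · rw [Int.toNat_natCast]; omega
  set bucket := vals.foldl bucketStepB (List.replicate (n + 1) 0) with hbk
  have hbucket : ∀ c : Int, 1 ≤ c → c.toNat < n + 1 →
      PySem.List.pyGetD bucket c 0 = (vals.count c : Int) := by
    intro c h1 h2
    rw [hbk, bucket_count vals _ c h1 (by simpa using h2)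
        (fun v hvv => by simpa using hvbound v hvv)]
    rw [PySem.List.pyGetD_eq_getElem _ _ (by omega) (by rw [List.length_replicate]; push_cast; omega)]
    simp
  set cs := PySem.List.pyRange (n : Int) 0 (-1) with hcsd
  have hcsmem : ∀ x : Int, x ∈ cs ↔ 0 < x ∧ x ≤ (n : Int) := fun x =>
    PySem.List.mem_pyRange_neg_one
  have hcsnd : cs.Nodup := by
    rw [hcsd, PySem.List.pyRange_neg_one_eq_reverse]
    exact List.nodup_reverse.mpr (PySem.List.nodup_pyRange_one _ _)
  have hcspair : cs.Pairwise (fun a b => b < a) := by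
    rw [hcsd, PySem.List.pyRange_neg_one_eq_reverse]
    exact List.pairwise_reverse.mpr (PySem.List.pairwise_lt_pyRange_one _ _)
  set F := cs.flatMap (fun c => List.replicate ((PySem.List.pyGetD bucket c 0).toNat) c) with hF
  have hcount : ∀ v : Int, F.count v = vals.count v := by
    intro v
    rw [hF, count_flat cs _ v hcsnd]
    by_cases hvc : v ∈ cs
    · rw [if_pos hvc]
      obtain ⟨h1, h2⟩ := (hcsmem v).mp hvc
      rw [hbucket v (by omega) (by omega)]
      simp
    · rw [if_neg hvc, eq_comm, List.count_eq_zero]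
      intro hvv
      obtain ⟨h1, h2⟩ := hvbound v hvv
      exact hvc ((hcsmem v).mpr ⟨by omega, by omega⟩)
  have hperm : F.Perm vals := List.perm_iff_count.mpr (fun a => hcount a)
  have hFsorted : F = PySem.List.sorted vals (fun c => c) true := by
    apply List.Perm.eq_of_pairwise (le := fun a b : Int => b ≤ a)
    · intro a b _ _ h1 h2; omega
    · exact flat_pairwise cs _ hcspair
    · exact PySem.List.sorted_pairwise_rev vals (fun c => c)
    · exact hperm.trans (PySem.List.sorted_perm vals (fun c => c) true).symm
  have hcsprops : ∀ c ∈ cs, 0 < c ∧ 0 ≤ PySem.List.pyGetD bucket c 0 := by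
    intro c hcc
    obtain ⟨h1, h2⟩ := (hcsmem c).mp hcc
    refine ⟨h1, ?_⟩
    rw [hbucket c (by omega) (by omega)]
    positivity
  have hB : takeB cs bucket k 0 = accumB k F 0 0 := by
    have h := takeB_eq_accumB k bucket cs 0 0 hcsprops
    rw [hF]
    simpa using h
  rw [hB, hFsorted]
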